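-- pv_equiv track=rewrite | github.com/texttechnologylab/textimager-uima | textimager-uima-text2scene/src/main/resources/bert.py | __add_indices
-- ===== SOURCE A (Python) =====
-- def __add_indices(tags):
--     tagger = []
--     last_index = 0
--     for (word, pos) in tags:
--         if "." in pos:
--             last_index -= 1
--         tagger.append((word, pos, last_index, last_index + len(word)))
--         last_index += len(word) + 1
--
--     return tagger
-- ===== SOURCE B (Python) =====
-- def __add_indices(tags):
--     # Two-pass decomposition: exclusive prefix-sum array R first, tuple assembly second.
--     dots = ["." in pos for _, pos in tags]
--     R = [0]
--     for (word, _), d in zip(tags, dots):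
--         R.append(R[-1] + len(word) + 1 - d)
--     return [(word, pos, r - d, r - d + len(word))
--             for (word, pos), d, r in zip(tags, dots, R)]
-- ===== Notes on version B (the rewrite author's own statement) =====
-- stated objective: alternative
-- what changed: Replaces the single loop threading a mutable running index through appends with a two-pass decomposition: an exclusive prefix-sum array R of per-word contributions (len+1 minus the dot flag) is built first, then each output tuple is assembled independently by zipping tags with their dot flags and R entries.
import Mathlib
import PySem

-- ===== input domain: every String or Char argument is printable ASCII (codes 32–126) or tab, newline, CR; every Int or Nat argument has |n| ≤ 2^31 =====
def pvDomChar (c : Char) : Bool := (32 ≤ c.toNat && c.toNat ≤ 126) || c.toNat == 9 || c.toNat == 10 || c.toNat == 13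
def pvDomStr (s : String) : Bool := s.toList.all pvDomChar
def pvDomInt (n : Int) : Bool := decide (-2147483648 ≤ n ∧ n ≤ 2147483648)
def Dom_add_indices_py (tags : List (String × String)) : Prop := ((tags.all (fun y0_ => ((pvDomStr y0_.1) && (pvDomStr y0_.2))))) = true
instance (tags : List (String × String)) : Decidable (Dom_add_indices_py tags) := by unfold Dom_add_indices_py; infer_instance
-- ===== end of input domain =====

-- B replaces A's single mutable-accumulator loop by a two-pass decomposition
-- (exclusive prefix-sum array, then independent tuple assembly); same cost, proved equal.


-- ===== PORT A =====
def add_indices_py (tags : List (String × String)) : List (String × String × Int × Int) :=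
  (tags.foldl
    (fun (st : List (String × String × Int × Int) × Int) wp =>
      let li : Int := if PySem.Str.isIn "." wp.2 then st.2 - 1 else st.2
      (st.1 ++ [(wp.1, wp.2, li, li + PySem.Str.len wp.1)], li + PySem.Str.len wp.1 + 1))
    ([], 0)).1

-- ===== PORT B =====
def add_indices_py_alt (tags : List (String × String)) : List (String × String × Int × Int) :=
  let dots : List Int := tags.map (fun wp => if PySem.Str.isIn "." wp.2 then 1 else 0)
  -- R[-1] on a list that is never empty (it starts as [0]); the .getD 0 default is unreachable
  let R : List Int := (tags.zip dots).foldl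
    (fun R wd => R ++ [(PySem.List.pyGet? R (-1)).getD 0 + PySem.Str.len wd.1.1 + 1 - wd.2]) [0]
  List.zipWith3 (fun (wp : String × String) (d r : Int) =>
    (wp.1, wp.2, r - d, r - d + PySem.Str.len wp.1)) tags dots R

-- ===== PRECONDITION & SPEC =====
def Spec_add_indices_py (tags : List (String × String)) (out : List (String × String × Int × Int)) : Prop := out = add_indices_py_alt tags
instance (tags : List (String × String)) (out : List (String × String × Int × Int)) : Decidable (Spec_add_indices_py tags out) := by unfold Spec_add_indices_py; infer_instance

-- ===== CLAIM (what is proved, stated in full; the proofs are below) =====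
def Claim_equal_add_indices_py : Prop := ∀ (tags : List (String × String)), Dom_add_indices_py tags → Spec_add_indices_py tags (add_indices_py tags)

-- ===== LEMMAS AND PROOFS =====

-- the common "spine": A's loop written as structural recursion
def pvSpine : List (String × String) → Int → List (String × String × Int × Int)
  | [], _ => []
  | wp :: rest, li =>
    let li' : Int := if PySem.Str.isIn "." wp.2 then li - 1 else li
    (wp.1, wp.2, li', li' + PySem.Str.len wp.1) :: pvSpine rest (li' + PySem.Str.len wp.1 + 1)

lemma pvA_foldl (tags : List (String × String))
    (acc : List (String × String × Int × Int)) (li : Int) :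
    (tags.foldl
      (fun (st : List (String × String × Int × Int) × Int) wp =>
        let l : Int := if PySem.Str.isIn "." wp.2 then st.2 - 1 else st.2
        (st.1 ++ [(wp.1, wp.2, l, l + PySem.Str.len wp.1)], l + PySem.Str.len wp.1 + 1))
      (acc, li)).1 = acc ++ pvSpine tags li := by
  induction tags generalizing acc li with
  | nil => simp [pvSpine]
  | cons wp rest ih =>
    simp only [List.foldl_cons]
    rw [ih]
    simp [pvSpine, List.append_assoc]

-- the R-tail produced by B's fold, as structural recursion over (tag, dot) pairs
def pvRTail : List ((String × String) × Int) → Int → List Int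
  | [], _ => []
  | wd :: rest, li =>
    let li' : Int := li + PySem.Str.len wd.1.1 + 1 - wd.2
    li' :: pvRTail rest li'

lemma pvB_foldl (zs : List ((String × String) × Int)) (L : List Int) (x : Int) :
    (zs.foldl
      (fun R wd => R ++ [(PySem.List.pyGet? R (-1)).getD 0 + PySem.Str.len wd.1.1 + 1 - wd.2])
      (L ++ [x])) = (L ++ [x]) ++ pvRTail zs x := by
  induction zs generalizing L x with
  | nil => simp [pvRTail]
  | cons wd rest ih =>
    simp only [List.foldl_cons, pvRTail]
    rw [PySem.List.pyGet?_neg_one_append_singleton]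
    have := ih (L ++ [x]) (x + PySem.Str.len wd.1.1 + 1 - wd.2)
    simpa [List.append_assoc] using this

lemma pvZip_spine (tags : List (String × String)) (li : Int) :
    List.zipWith3 (fun (wp : String × String) (d r : Int) =>
        (wp.1, wp.2, r - d, r - d + PySem.Str.len wp.1))
      tags (tags.map (fun wp => if PySem.Str.isIn "." wp.2 then (1 : Int) else 0))
      (li :: pvRTail (tags.zip (tags.map (fun wp => if PySem.Str.isIn "." wp.2 then (1 : Int) else 0))) li)
    = pvSpine tags li := by
  induction tags generalizing li with
  | nil => simp [pvSpine, List.zipWith3]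
  | cons wp rest ih =>
    simp only [List.map_cons, List.zip_cons_cons, pvRTail, List.zipWith3, pvSpine]
    have harg : li + PySem.Str.len wp.1 + 1 - (if PySem.Str.isIn "." wp.2 then (1:Int) else 0)
        = (if PySem.Str.isIn "." wp.2 then li - 1 else li) + PySem.Str.len wp.1 + 1 := by
      split_ifs <;> ring
    have hhead : li - (if PySem.Str.isIn "." wp.2 then (1:Int) else 0)
        = (if PySem.Str.isIn "." wp.2 then li - 1 else li) := by
      split_ifs <;> ring
    rw [harg, hhead, ih]

-- ===== VERDICT (by name: the statement is the Claim_ definition above) =====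
theorem add_indices_py_spec : Claim_equal_add_indices_py := by
  intro tags _
  show add_indices_py tags = add_indices_py_alt tags
  unfold add_indices_py add_indices_py_alt
  simp only []
  have hA := pvA_foldl tags [] 0
  simp only at hA
  rw [hA]
  have hB := pvB_foldl (tags.zip (tags.map (fun wp => if PySem.Str.isIn "." wp.2 then (1 : Int) else 0))) [] 0
  simp only [List.nil_append] at hB
  rw [hB]
  exact (pvZip_spine tags 0).symm
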